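-- pv_equiv track=rewrite | github.com/crypto-code/CS4248-Project | transform_data.py | get_word_index
-- ===== SOURCE A (Python) =====
-- def get_word_index(word_list, start, end):
--     start_ind = 0
--     end_ind = 0
--     pos = -1
--     for ind, word in enumerate(word_list):
--         for c in word:
--             if pos == start:
--                 start_ind = ind
--             if pos == end:
--                 end_ind = ind
--             pos += 1
--
--     return start_ind, end_ind
-- ===== SOURCE B (Python) =====
-- def get_word_index(word_list, start, end):
--     # A's scan sets start_ind to the word containing flat character position
--     # start+1 (0-based over the concatenation), defaulting to 0; same for end.
--     def find(target):
--         cum = 0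
--         for ind, word in enumerate(word_list):
--             n = len(word)
--             if cum <= target < cum + n:
--                 return ind
--             cum += n
--         return 0
--     return find(start + 1), find(end + 1)
-- ===== Notes on version B (the rewrite author's own statement) =====
-- stated objective: faster
-- what changed: Replaces the per-character scan keeping a running position with a per-word scan over word lengths that locates the word whose cumulative length range contains start+1 / end+1, with early exit.
import Mathlib
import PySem

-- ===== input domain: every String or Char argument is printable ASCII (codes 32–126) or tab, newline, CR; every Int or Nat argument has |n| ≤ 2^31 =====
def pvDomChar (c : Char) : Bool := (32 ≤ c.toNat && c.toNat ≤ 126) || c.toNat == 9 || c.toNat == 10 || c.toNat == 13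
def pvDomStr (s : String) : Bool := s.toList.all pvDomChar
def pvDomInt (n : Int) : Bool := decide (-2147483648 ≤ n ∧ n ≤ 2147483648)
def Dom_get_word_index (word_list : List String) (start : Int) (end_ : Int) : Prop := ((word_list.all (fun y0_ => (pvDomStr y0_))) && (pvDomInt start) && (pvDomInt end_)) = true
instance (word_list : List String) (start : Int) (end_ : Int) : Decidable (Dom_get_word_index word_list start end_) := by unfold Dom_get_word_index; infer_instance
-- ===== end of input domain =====

-- B replaces A's per-character scan with a per-word scan over word lengths (asymptotically faster; equivalence proved on all inputs).


-- ===== PORT A =====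
-- inner 'for c in word' loop: state (start_ind, end_ind, pos)
def pvAInner (start end_ ind : Int) (t : Int × Int × Int) (_c : Char) : Int × Int × Int :=
  ((if t.2.2 = start then ind else t.1),
   (if t.2.2 = end_ then ind else t.2.1),
   t.2.2 + 1)

-- outer 'for ind, word in enumerate(word_list)' loop, carrying the index
def pvALoop (start end_ : Int) : List String → Int → (Int × Int × Int) → Int × Int × Int
  | [], _, st => st
  | w :: ws, ind, st => pvALoop start end_ ws (ind + 1) (w.toList.foldl (pvAInner start end_ ind) st)

def get_word_index (word_list : List String) (start : Int) (end_ : Int) : Int × Int :=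
  let r := pvALoop start end_ word_list 0 (0, 0, -1)
  (r.1, r.2.1)

-- ===== PORT B =====
-- Source B's find(target): walk the words with a cumulative length, early return on hit, 0 at the end
def pvBFind : List String → Int → Int → Int → Int
  | [], _, _, _ => 0
  | w :: ws, ind, cum, target =>
      if cum ≤ target ∧ target < cum + (PySem.Str.len w) then ind
      else pvBFind ws (ind + 1) (cum + PySem.Str.len w) target

def get_word_index_alt (word_list : List String) (start : Int) (end_ : Int) : Int × Int :=
  (pvBFind word_list 0 0 (start + 1), pvBFind word_list 0 0 (end_ + 1))

-- ===== PRECONDITION & SPEC =====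
def Spec_get_word_index (word_list : List String) (start : Int) (end_ : Int) (out : Int × Int) : Prop := out = get_word_index_alt word_list start end_
instance (word_list : List String) (start : Int) (end_ : Int) (out : Int × Int) : Decidable (Spec_get_word_index word_list start end_ out) := by unfold Spec_get_word_index; infer_instance

-- ===== CLAIM (what is proved, stated in full; the proofs are below) =====
def Claim_equal_get_word_index : Prop := ∀ (word_list : List String) (start : Int) (end_ : Int), Dom_get_word_index word_list start end_ → Spec_get_word_index word_list start end_ (get_word_index word_list start end_)

-- ===== LEMMAS AND PROOFS =====

-- first word index (from ind, cumulative cum) whose length range contains target, if any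
def pvFind? : List String → Int → Int → Int → Option Int
  | [], _, _, _ => none
  | w :: ws, ind, cum, target =>
      if cum ≤ target ∧ target < cum + (PySem.Str.len w) then some ind
      else pvFind? ws (ind + 1) (cum + PySem.Str.len w) target

lemma pvBFind_eq_find? (ws : List String) (ind cum t : Int) :
    pvBFind ws ind cum t = (pvFind? ws ind cum t).getD 0 := by
  induction ws generalizing ind cum with
  | nil => rfl
  | cons w ws ih =>
      simp only [pvBFind, pvFind?]
      split_ifs <;> simp [ih]

lemma pvFind?_none (ws : List String) (ind cum t : Int) (h : t < cum) :
    pvFind? ws ind cum t = none := by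
  induction ws generalizing ind cum with
  | nil => rfl
  | cons w ws ih =>
      have hn : (0:Int) ≤ PySem.Str.len w := by
        simp [PySem.Str.len_eq]
      rw [pvFind?, if_neg (by omega)]
      exact ih _ _ (by omega)

lemma pvInner_foldl (cs : List Char) (start end_ ind s0 e0 p : Int) :
    cs.foldl (pvAInner start end_ ind) (s0, e0, p) =
      ((if p ≤ start ∧ start < p + (cs.length : Int) then ind else s0),
       (if p ≤ end_ ∧ end_ < p + (cs.length : Int) then ind else e0),
       p + (cs.length : Int)) := by
  induction cs generalizing s0 e0 p with
  | nil => simp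
  | cons c cs ih =>
      simp only [List.foldl_cons, pvAInner, ih, List.length_cons]
      refine Prod.ext ?_ (Prod.ext ?_ ?_) <;> simp only
      · split_ifs <;> first | rfl | omega
      · split_ifs <;> first | rfl | omega
      · push_cast; ring

lemma pvALoop_eq (ws : List String) (start end_ ind cum s0 e0 : Int) :
    pvALoop start end_ ws ind (s0, e0, cum - 1) =
      ((pvFind? ws ind cum (start + 1)).getD s0,
       (pvFind? ws ind cum (end_ + 1)).getD e0,
       cum - 1 + ((ws.map (fun w => (w.toList.length : Int))).sum)) := by
  induction ws generalizing ind cum s0 e0 with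
  | nil => simp [pvALoop, pvFind?]
  | cons w ws ih =>
      have hl : PySem.Str.len w = (w.toList.length : Int) := by
        simp [PySem.Str.len_eq]
      rw [pvALoop, pvInner_foldl]
      have hc : cum - 1 + (w.toList.length : Int) = (cum + w.toList.length) - 1 := by ring
      rw [hc, ih]
      simp only [pvFind?, hl, List.map_cons, List.sum_cons]
      refine Prod.ext ?_ (Prod.ext ?_ ?_) <;> simp only
      · by_cases h : cum ≤ start + 1 ∧ start + 1 < cum + (w.toList.length : Int)
        · rw [if_pos h, if_pos (by omega),
            pvFind?_none ws (ind + 1) (cum + (w.toList.length : Int)) (start + 1) (by omega)]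
          rfl
        · rw [if_neg h, if_neg (by omega)]
      · by_cases h : cum ≤ end_ + 1 ∧ end_ + 1 < cum + (w.toList.length : Int)
        · rw [if_pos h, if_pos (by omega),
            pvFind?_none ws (ind + 1) (cum + (w.toList.length : Int)) (end_ + 1) (by omega)]
          rfl
        · rw [if_neg h, if_neg (by omega)]
      · ring

-- ===== VERDICT (by name: the statement is the Claim_ definition above) =====
theorem get_word_index_spec : Claim_equal_get_word_index := by
  intro word_list start end_ _
  unfold Spec_get_word_index get_word_index get_word_index_alt
  have h0 : (-1 : Int) = 0 - 1 := by norm_num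
  rw [h0, pvALoop_eq, pvBFind_eq_find?, pvBFind_eq_find?]
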